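-- pv_equiv track=rewrite | github.com/munyanyaguo/red-team-agent | app/modules/sql_injection.py | _assess_exploitation_level
-- ===== SOURCE A (Python) =====
-- from typing import Dict, List, Any, Optional, Tuple
--
-- def _assess_exploitation_level(vulnerabilities: List[Dict[str, Any]]) -> str:
--     """Assess the level of exploitation possible."""
--     vuln_types = set(v['type'] for v in vulnerabilities)
--
--     if 'union_based_sqli' in vuln_types or 'error_based_sqli' in vuln_types:
--         return 'high'  # Direct data extraction possible
--     elif 'boolean_based_blind_sqli' in vuln_types or 'time_based_blind_sqli' in vuln_types:
--         return 'medium'  # Blind extraction possible but slower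
--     else:
--         return 'low'
-- ===== SOURCE B (Python) =====
-- from typing import Dict, List, Any
--
-- _RANKS = {
--     'union_based_sqli': 2,
--     'error_based_sqli': 2,
--     'boolean_based_blind_sqli': 1,
--     'time_based_blind_sqli': 1,
-- }
--
-- _LEVELS = {2: 'high', 1: 'medium', 0: 'low'}
--
-- def _assess_exploitation_level(vulnerabilities: List[Dict[str, Any]]) -> str:
--     """Assess the level of exploitation possible."""
--     best = max((_RANKS.get(v['type'], 0) for v in vulnerabilities), default=0)
--     return _LEVELS[best]
-- ===== Notes on version B (the rewrite author's own statement) =====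
-- stated objective: idiomatic
-- what changed: Replaced the set-build plus tiered membership tests with a severity-rank table and a single max-reduce over the vulnerability types, mapping the best rank to its level name.
import Mathlib
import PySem

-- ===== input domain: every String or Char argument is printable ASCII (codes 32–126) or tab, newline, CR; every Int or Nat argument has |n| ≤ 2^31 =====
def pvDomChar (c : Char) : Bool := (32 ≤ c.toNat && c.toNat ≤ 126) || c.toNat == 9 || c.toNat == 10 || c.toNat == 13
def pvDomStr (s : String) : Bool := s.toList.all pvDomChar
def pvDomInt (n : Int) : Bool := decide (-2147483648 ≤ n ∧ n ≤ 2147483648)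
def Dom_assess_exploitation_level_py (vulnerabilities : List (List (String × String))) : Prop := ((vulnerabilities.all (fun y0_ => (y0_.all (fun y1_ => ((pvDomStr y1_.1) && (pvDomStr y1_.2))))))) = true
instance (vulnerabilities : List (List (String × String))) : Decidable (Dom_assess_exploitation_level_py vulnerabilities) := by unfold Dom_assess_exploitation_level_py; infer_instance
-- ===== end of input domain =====

-- B replaces A's set-build plus tiered membership checks by a severity-rank table and one max-reduce (idiomatic; not faster).

-- ===== PORT A =====
def assess_exploitation_level_py (vulnerabilities : List (List (String × String))) : String :=
  let vuln_types : PySem.Set String :=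
    PySem.Set.ofList (vulnerabilities.map (fun v => PySem.Dict.getD (PySem.Dict.mk v) "type" ""))
  if PySem.Set.contains vuln_types "union_based_sqli" || PySem.Set.contains vuln_types "error_based_sqli" then
    "high"
  else if PySem.Set.contains vuln_types "boolean_based_blind_sqli" || PySem.Set.contains vuln_types "time_based_blind_sqli" then
    "medium"
  else
    "low"

-- ===== PORT B =====
def pvRanks : PySem.Dict String Int :=
  PySem.Dict.mk [("union_based_sqli", 2), ("error_based_sqli", 2),
   ("boolean_based_blind_sqli", 1), ("time_based_blind_sqli", 1)]

def pvLevels : PySem.Dict Int String := PySem.Dict.mk [(2, "high"), (1, "medium"), (0, "low")]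

def assess_exploitation_level_py_alt (vulnerabilities : List (List (String × String))) : String :=
  let best : Int :=
    (PySem.List.max?
      (vulnerabilities.map (fun v => PySem.Dict.getD pvRanks (PySem.Dict.getD (PySem.Dict.mk v) "type" "") 0))
      (fun x => x)).getD 0
  PySem.Dict.getD pvLevels best ""

-- ===== PRECONDITION & SPEC =====
-- Pre_ excludes only dicts missing the 'type' key, on which the Python A (and B) raises KeyError.
def Pre_assess_exploitation_level_py (vulnerabilities : List (List (String × String))) : Prop :=
  ∀ v ∈ vulnerabilities, PySem.Dict.contains (PySem.Dict.mk v) "type" = true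
instance (vulnerabilities : List (List (String × String))) : Decidable (Pre_assess_exploitation_level_py vulnerabilities) := by unfold Pre_assess_exploitation_level_py; infer_instance

def pvWitness_assess_exploitation_level_py : (List (List (String × String))) :=
  [[("type", "union_based_sqli")], [("type", "boolean_based_blind_sqli")]]

def Spec_assess_exploitation_level_py (vulnerabilities : List (List (String × String))) (out : String) : Prop := out = assess_exploitation_level_py_alt vulnerabilities
instance (vulnerabilities : List (List (String × String))) (out : String) : Decidable (Spec_assess_exploitation_level_py vulnerabilities out) := by unfold Spec_assess_exploitation_level_py; infer_instance

-- ===== CLAIM (what is proved, stated in full; the proofs are below) =====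
def Claim_equal_assess_exploitation_level_py : Prop := ∀ (vulnerabilities : List (List (String × String))), Dom_assess_exploitation_level_py vulnerabilities → Pre_assess_exploitation_level_py vulnerabilities → Spec_assess_exploitation_level_py vulnerabilities (assess_exploitation_level_py vulnerabilities)

-- ===== LEMMAS AND PROOFS =====

def pvRank (t : String) : Int := PySem.Dict.getD pvRanks t 0

def pvBest (ts : List String) : Int :=
  (PySem.List.max? (ts.map pvRank) (fun x => x)).getD 0

theorem pvRank_eq (t : String) :
    pvRank t = if t = "union_based_sqli" then 2 else if t = "error_based_sqli" then 2
      else if t = "boolean_based_blind_sqli" then 1 else if t = "time_based_blind_sqli" then 1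
      else 0 := by
  by_cases h1 : t = "union_based_sqli"
  · subst h1; decide
  by_cases h2 : t = "error_based_sqli"
  · subst h2; decide
  by_cases h3 : t = "boolean_based_blind_sqli"
  · subst h3; decide
  by_cases h4 : t = "time_based_blind_sqli"
  · subst h4; decide
  have e1 : ("union_based_sqli" == t) = false := beq_eq_false_iff_ne.mpr (fun h => h1 h.symm)
  have e2 : ("error_based_sqli" == t) = false := beq_eq_false_iff_ne.mpr (fun h => h2 h.symm)
  have e3 : ("boolean_based_blind_sqli" == t) = false := beq_eq_false_iff_ne.mpr (fun h => h3 h.symm)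
  have e4 : ("time_based_blind_sqli" == t) = false := beq_eq_false_iff_ne.mpr (fun h => h4 h.symm)
  simp [pvRank, pvRanks, PySem.Dict.getD, PySem.Dict.get?, List.find?, e1, e2, e3, e4, h1, h2, h3, h4]

theorem pvRank_nonneg (t : String) : 0 ≤ pvRank t := by
  rw [pvRank_eq]; split_ifs <;> norm_num

theorem foldl_max_assoc (l : List Int) (a b : Int) :
    l.foldl max (max a b) = max a (l.foldl max b) := by
  induction l generalizing b with
  | nil => rfl
  | cons x xs ih =>
    simp only [List.foldl_cons, max_assoc, ih]

theorem pvBest_cons (t : String) (ts : List String) :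
    pvBest (t :: ts) = max (pvRank t) (pvBest ts) := by
  cases ts with
  | nil =>
    have h := pvRank_nonneg t
    simp only [pvBest, List.map_cons, List.map_nil, PySem.List.max?_id_cons, List.foldl_nil,
      Option.getD_some]
    have hnone : (PySem.List.max? ([] : List Int) (fun x => x)) = none := by
      simp [PySem.List.max?_eq_none_iff]
    rw [hnone]
    simp only [Option.getD_none]
    omega
  | cons t' ts' =>
    simp only [pvBest, List.map_cons, PySem.List.max?_id_cons, Option.getD_some,
      List.foldl_cons]
    rw [foldl_max_assoc]

theorem pvBest_eq (ts : List String) :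
    pvBest ts =
      if "union_based_sqli" ∈ ts ∨ "error_based_sqli" ∈ ts then 2
      else if "boolean_based_blind_sqli" ∈ ts ∨ "time_based_blind_sqli" ∈ ts then 1
      else 0 := by
  induction ts with
  | nil => simp [pvBest, PySem.List.max?]
  | cons t ts ih =>
    rw [pvBest_cons, ih, pvRank_eq]
    by_cases h1 : t = "union_based_sqli" <;> by_cases h2 : t = "error_based_sqli" <;>
    by_cases h3 : t = "boolean_based_blind_sqli" <;> by_cases h4 : t = "time_based_blind_sqli" <;>
      simp_all [List.mem_cons, eq_comm] <;> split_ifs <;> omega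

-- ===== VERDICT (by name: the statement is the Claim_ definition above) =====
theorem assess_exploitation_level_py_spec : Claim_equal_assess_exploitation_level_py := by
  intro vulns _ _
  unfold Spec_assess_exploitation_level_py assess_exploitation_level_py assess_exploitation_level_py_alt
  rw [show (PySem.List.max?
      (vulns.map (fun v => PySem.Dict.getD pvRanks (PySem.Dict.getD (PySem.Dict.mk v) "type" "") 0))
      (fun x => x)).getD 0 = pvBest (vulns.map (fun v => PySem.Dict.getD (PySem.Dict.mk v) "type" "")) by
    simp [pvBest, pvRank, List.map_map, Function.comp_def]]
  rw [pvBest_eq]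
  generalize (vulns.map (fun v => PySem.Dict.getD (PySem.Dict.mk v) "type" "")) = ts
  by_cases h1 : "union_based_sqli" ∈ ts <;>
  by_cases h2 : "error_based_sqli" ∈ ts <;>
  by_cases h3 : "boolean_based_blind_sqli" ∈ ts <;>
  by_cases h4 : "time_based_blind_sqli" ∈ ts <;>
    simp_all [PySem.Set.contains, PySem.Set.mem_ofList, pvLevels, PySem.Dict.getD, PySem.Dict.get?]
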